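-- pv_equiv track=rewrite | github.com/honokani/frequency_code_chearsheets | python/sandbox/csv_2_ml_dataset.py | make_dic_by_raw_y
-- ===== SOURCE A (Python) =====
-- def make_dic_by_raw_y(ystrss):
--     dic = {}
--     count = 0
--     for ystrs in ystrss:
--         for ystr in ystrs:
--             if not ystr in dic:
--                 dic[ystr] = count
--                 count = count + 1
--     return dic
-- ===== SOURCE B (Python) =====
-- def make_dic_by_raw_y(ystrss):
--     # Position-based algorithm: a single REVERSE scan records each string's
--     # first-occurrence position (later writes overwrite, so the earliest wins),
--     # then the positions are sorted and ranked to rebuild the mapping.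
--     flat = [ystr for ystrs in ystrss for ystr in ystrs]
--     first_pos = {s: p for p, s in reversed(list(enumerate(flat)))}
--     positions = sorted(first_pos.values())
--     return {flat[p]: rank for rank, p in enumerate(positions)}
-- ===== Notes on version B (the rewrite author's own statement) =====
-- stated objective: alternative
-- what changed: Replaces A's forward pass with a membership dict and running counter by a position-based algorithm: a reverse scan records each string's first-occurrence position, the positions are sorted, and their ranks rebuild the mapping.
import Mathlib
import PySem

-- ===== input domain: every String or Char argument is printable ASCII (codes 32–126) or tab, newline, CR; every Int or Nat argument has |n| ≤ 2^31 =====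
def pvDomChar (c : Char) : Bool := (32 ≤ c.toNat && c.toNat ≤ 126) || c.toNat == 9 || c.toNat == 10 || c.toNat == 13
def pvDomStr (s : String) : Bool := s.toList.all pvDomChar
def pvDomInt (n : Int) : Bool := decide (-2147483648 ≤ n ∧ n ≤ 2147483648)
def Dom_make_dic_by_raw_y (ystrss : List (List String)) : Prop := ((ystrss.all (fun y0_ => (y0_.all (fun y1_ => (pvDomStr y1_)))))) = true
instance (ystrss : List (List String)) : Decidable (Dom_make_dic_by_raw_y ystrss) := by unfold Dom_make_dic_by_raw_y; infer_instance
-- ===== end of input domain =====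

-- B replaces A's forward pass with a membership test and running counter by a
-- position-based algorithm: a reverse scan records first-occurrence positions,
-- which are then sorted and ranked (alternative decomposition; same return value).

-- ===== PORT A =====
-- nested loops over ystrss/ystrs, membership test, insert with running counter
def make_dic_by_raw_y (ystrss : List (List String)) : List (String × Int) :=
  let st :=
    ystrss.foldl (fun st ystrs =>
      ystrs.foldl (fun st ystr =>
        if st.1.contains ystr then st
        else (st.1.insert ystr st.2, st.2 + 1)) st)
      ((PySem.Dict.empty : PySem.Dict String Int), (0 : Int))
  st.1.items

-- ===== PORT B =====
-- flat = flattened comprehension; first_pos = {s: p for p, s in reversed(list(enumerate(flat)))};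
-- positions = sorted(first_pos.values()); result = {flat[p]: rank for rank, p in enumerate(positions)}.
-- flat[p] never raises (p is a valid index), so the .getD "" below is never taken; the final
-- dict comprehension's keys flat[p] are pairwise distinct (distinct first positions), so it
-- is the plain list of pairs.
def make_dic_by_raw_y_alt (ystrss : List (List String)) : List (String × Int) :=
  let flat := ystrss.flatten
  let firstPos := ((PySem.List.enumerate flat 0).reverse).foldl
      (fun d p => d.insert p.2 p.1) (PySem.Dict.empty : PySem.Dict String Int)
  let positions := PySem.List.sorted firstPos.values (fun x => x)
  (PySem.List.enumerate positions 0).map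
    (fun p => ((PySem.List.pyGet? flat p.2).getD "", p.1))

-- ===== PRECONDITION & SPEC =====
def Spec_make_dic_by_raw_y (ystrss : List (List String)) (out : List (String × Int)) : Prop := out = make_dic_by_raw_y_alt ystrss
instance (ystrss : List (List String)) (out : List (String × Int)) : Decidable (Spec_make_dic_by_raw_y ystrss out) := by unfold Spec_make_dic_by_raw_y; infer_instance

-- ===== CLAIM (what is proved, stated in full; the proofs are below) =====
def Claim_equal_make_dic_by_raw_y : Prop := ∀ (ystrss : List (List String)), Dom_make_dic_by_raw_y ystrss → Spec_make_dic_by_raw_y ystrss (make_dic_by_raw_y ystrss)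

-- ===== LEMMAS AND PROOFS =====

-- A-side characterisation: the dict A has built after seeing the distinct keys `keys`
def pvEncode (keys : List String) : PySem.Dict String Int :=
  PySem.Dict.mk (keys.zipIdx.map (fun p => (p.1, (p.2 : Int))))

theorem pvEncode_keys (keys : List String) : (pvEncode keys).keys = keys := by
  simp [pvEncode, PySem.Dict.keys, Function.comp_def]

theorem pvEncode_contains (keys : List String) (x : String) :
    (pvEncode keys).contains x = decide (x ∈ keys) := by
  rw [PySem.Dict.contains_eq_decide_mem_keys, pvEncode_keys]

theorem pvStep (keys : List String) (x : String) :
    (if (pvEncode keys).contains x then (pvEncode keys, (keys.length : Int))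
     else ((pvEncode keys).insert x (keys.length : Int), (keys.length : Int) + 1))
    = (pvEncode (PySem.Set.add keys x), ((PySem.Set.add keys x).length : Int)) := by
  by_cases h : x ∈ keys
  · simp [pvEncode_contains, h, PySem.Set.add]
  · rw [pvEncode_contains]
    simp only [h, decide_false, Bool.false_eq_true, if_false]
    rw [PySem.Set.add_of_not_mem h]
    have hins := PySem.Dict.items_insert_of_not_contains (pvEncode keys) (k := x)
      ((keys.length : Int)) (by rw [pvEncode_contains]; simp [h])
    refine Prod.ext ?_ ?_
    · apply PySem.Dict.ext
      rw [hins]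
      simp [pvEncode, List.zipIdx_append]
    · simp

theorem pvLoop (l : List String) : ∀ (keys : List String),
    l.foldl (fun st ystr =>
        if st.1.contains ystr then st
        else (st.1.insert ystr st.2, st.2 + 1))
      (pvEncode keys, (keys.length : Int))
    = (pvEncode (l.foldl PySem.Set.add keys), ((l.foldl PySem.Set.add keys).length : Int)) := by
  induction l with
  | nil => intro keys; rfl
  | cons x xs ih =>
    intro keys
    simp only [List.foldl_cons]
    rw [show (if (pvEncode keys).contains x then (pvEncode keys, (keys.length : Int))
          else ((pvEncode keys).insert x (keys.length : Int), (keys.length : Int) + 1))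
        = (pvEncode (PySem.Set.add keys x), ((PySem.Set.add keys x).length : Int)) from pvStep keys x]
    exact ih (PySem.Set.add keys x)

theorem pvA_char (ystrss : List (List String)) :
    make_dic_by_raw_y ystrss
      = (PySem.List.enumerate (PySem.List.dedup ystrss.flatten) 0).map (fun p => (p.2, p.1)) := by
  simp only [make_dic_by_raw_y]
  rw [← List.foldl_flatten]
  have hl := pvLoop ystrss.flatten []
  simp only [List.length_nil, Nat.cast_zero] at hl
  rw [show (PySem.Dict.empty : PySem.Dict String Int) = pvEncode [] from rfl, hl]
  rw [PySem.List.dedup_eq_ofList, PySem.Set.ofList_eq_foldl,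
    PySem.List.enumerate_eq_zipIdx_map]
  simp [pvEncode, Function.comp]

-- B-side machinery: PySem.List.dedup structure, and first-occurrence indices

theorem pvFoldlAdd {α : Type} [BEq α] [LawfulBEq α] (xs : List α) : ∀ (acc : List α),
    xs.foldl PySem.Set.add acc
      = acc ++ (xs.foldl PySem.Set.add []).filter (fun y => !acc.contains y) := by
  induction xs with
  | nil => intro acc; simp
  | cons x xs ih =>
    intro acc
    simp only [List.foldl_cons]
    rw [ih (PySem.Set.add acc x), ih (PySem.Set.add [] x)]
    have hadd0 : PySem.Set.add ([] : List α) x = [x] := by simp [PySem.Set.add]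
    rw [hadd0]
    by_cases h : x ∈ acc
    · have hstep : PySem.Set.add acc x = acc := by simp [PySem.Set.add, h]
      rw [hstep, List.filter_append, List.filter_filter]
      have h1 : ([x].filter (fun y => !acc.contains y)) = [] := by
        simp [List.filter, h]
      rw [h1, List.nil_append]
      congr 1
      apply List.filter_congr
      intro y _
      by_cases hy : y ∈ acc
      · simp [hy]
      · have hyx : y ≠ x := fun e => hy (e ▸ h)
        simp [hy, hyx]
    · have hstep : PySem.Set.add acc x = acc ++ [x] := by simp [PySem.Set.add, h]
      rw [hstep, List.filter_append, List.filter_filter]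
      have h1 : ([x].filter (fun y => !acc.contains y)) = [x] := by
        simp [List.filter, h]
      rw [h1, List.append_assoc]
      congr 2
      apply List.filter_congr
      intro y _
      by_cases hyx : y = x <;> simp [hyx, List.mem_append, h]

theorem pvDedupCons {α : Type} [BEq α] [LawfulBEq α] (x : α) (xs : List α) :
    PySem.List.dedup (x :: xs) = x :: (PySem.List.dedup xs).filter (fun y => !(y == x)) := by
  simp only [PySem.List.dedup_eq_ofList, PySem.Set.ofList_eq_foldl] at *
  have h0 : PySem.Set.add ([] : List α) x = [x] := by simp [PySem.Set.add]
  rw [List.foldl_cons, h0, pvFoldlAdd xs [x]]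
  rw [List.singleton_append]
  congr 1
  apply List.filter_congr
  intro y _
  by_cases hyx : y = x <;> simp [hyx]

theorem pvDedupPairwiseIdx {α : Type} [BEq α] [LawfulBEq α] (l : List α) :
    (PySem.List.dedup l).Pairwise (fun a b => List.idxOf a l < List.idxOf b l) := by
  induction l with
  | nil => simp [PySem.List.dedup_eq_ofList, PySem.Set.ofList_eq_foldl]
  | cons x xs ih =>
    rw [pvDedupCons]
    constructor
    · intro y hy
      have hyx : ¬ (y == x) := by
        have := (List.mem_filter.mp hy).2; simpa using this
      have hyx' : y ≠ x := by simpa using hyx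
      rw [List.idxOf_cons_self, List.idxOf_cons_ne _ (fun e => hyx' e.symm)]
      omega
    · refine List.Pairwise.imp_of_mem ?_ ((ih).filter _)
      intro a b ha hb hab
      have ha' : a ≠ x := by have := (List.mem_filter.mp ha).2; simpa using this
      have hb' : b ≠ x := by have := (List.mem_filter.mp hb).2; simpa using this
      rw [List.idxOf_cons_ne _ (fun e => ha' e.symm), List.idxOf_cons_ne _ (fun e => hb' e.symm)]
      omega

theorem pvGetFoldr (s : String) : ∀ (flat : List String) (n : Int) (d : PySem.Dict String Int),
    ((PySem.List.enumerate flat n).foldr (fun p d => d.insert p.2 p.1) d).get? s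
      = if s ∈ flat then some (n + (List.idxOf s flat : Nat)) else d.get? s := by
  intro flat
  induction flat with
  | nil => intro n d; simp [PySem.List.enumerate_nil]
  | cons x xs ih =>
    intro n d
    rw [PySem.List.enumerate_cons, List.foldr_cons]
    dsimp only
    by_cases hsx : s = x
    · subst hsx
      rw [PySem.Dict.get?_insert_self]
      simp [List.idxOf_cons_self]
    · rw [PySem.Dict.get?_insert_of_ne _ _ hsx, ih (n + 1) d]
      by_cases hmem : s ∈ xs
      · have : x ≠ s := fun e => hsx e.symm
        simp only [hmem, if_true, List.mem_cons, hsx, false_or, if_true,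
          List.idxOf_cons_ne _ this]
        congr 1
        push_cast
        ring
      · have : ¬ s ∈ x :: xs := by simp [hsx, hmem]
        simp [hmem, this]

theorem pvEnumMap (flat : List String) : ∀ (ks : List String), (∀ s ∈ ks, s ∈ flat) → ∀ (n : Int),
    (PySem.List.enumerate (ks.map (fun s => ((List.idxOf s flat : Nat) : Int))) n).map
        (fun p => ((PySem.List.pyGet? flat p.2).getD "", p.1))
      = (PySem.List.enumerate ks n).map (fun p => (p.2, p.1)) := by
  intro ks
  induction ks with
  | nil => intro _ n; rfl
  | cons s ks ih =>
    intro hmem n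
    have hs : s ∈ flat := hmem s List.mem_cons_self
    rw [List.map_cons, PySem.List.enumerate_cons, PySem.List.enumerate_cons,
      List.map_cons, List.map_cons]
    congr 1
    · have hlt : List.idxOf s flat < flat.length := List.idxOf_lt_length_iff.mpr hs
      simp [PySem.List.pyGet?_natCast, List.getElem?_eq_getElem hlt, List.getElem_idxOf hlt]
    · exact ih (fun t ht => hmem t (List.mem_cons_of_mem _ ht)) (n + 1)

-- ===== VERDICT (by name: the statement is the Claim_ definition above) =====
theorem make_dic_by_raw_y_spec : Claim_equal_make_dic_by_raw_y := by
  intro ystrss _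
  show make_dic_by_raw_y ystrss = make_dic_by_raw_y_alt ystrss
  rw [pvA_char]
  simp only [make_dic_by_raw_y_alt]
  set flat := ystrss.flatten with hflat
  set fp := ((PySem.List.enumerate flat 0).reverse).foldl
      (fun d p => d.insert p.2 p.1) (PySem.Dict.empty : PySem.Dict String Int) with hfp
  -- the dict's keys: the distinct strings, in order of first appearance in flat.reverse
  have hkeys : fp.keys = PySem.Set.ofList flat.reverse := by
    rw [hfp, PySem.Dict.keys_foldl_insert_key ((PySem.List.enumerate flat 0).reverse)
      (fun p => p.2) (fun _ p => p.1)]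
    rw [PySem.Dict.keys_empty, PySem.Set.update_nil_left, List.map_reverse,
      PySem.List.map_snd_enumerate]
  have hnodupk : fp.keys.Nodup := by rw [hkeys]; exact PySem.Set.nodup_ofList _
  -- the dict's lookups: the first-occurrence position
  have hget : ∀ s ∈ flat, fp.get? s = some ((List.idxOf s flat : Nat) : Int) := by
    intro s hs
    rw [hfp, List.foldl_reverse]
    have := pvGetFoldr s flat 0 PySem.Dict.empty
    simp only [hs, if_true, zero_add] at this
    exact this
  -- the values list, rewritten through the keys
  have hvals : fp.values = (PySem.Set.ofList flat.reverse).map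
      (fun s => ((List.idxOf s flat : Nat) : Int)) := by
    rw [PySem.Dict.values_eq_map_keys fp hnodupk 0, hkeys]
    apply List.map_congr_left
    intro s hsk
    have hs : s ∈ flat := by
      have := (PySem.Set.mem_ofList flat.reverse s).mp hsk
      simpa using this
    rw [PySem.Dict.getD_eq_get?_getD, hget s hs]
    rfl
  -- sorting the positions yields them in first-appearance order
  have hperm : ((PySem.List.dedup flat).map (fun s => ((List.idxOf s flat : Nat) : Int))).Perm
      fp.values := by
    rw [hvals]
    apply List.Perm.map
    apply (List.perm_ext_iff_of_nodup (PySem.List.nodup_dedup flat)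
      (PySem.Set.nodup_ofList _)).mpr
    intro a
    rw [PySem.List.mem_dedup, PySem.Set.mem_ofList, List.mem_reverse]
  have hpair : ((PySem.List.dedup flat).map
      (fun s => ((List.idxOf s flat : Nat) : Int))).Pairwise (fun a b => a < b) := by
    rw [List.pairwise_map]
    refine List.Pairwise.imp_of_mem ?_ (pvDedupPairwiseIdx flat)
    intro a b _ _ hab
    exact_mod_cast hab
  rw [PySem.List.sorted_eq_of_perm_of_pairwise_lt fp.values _ (fun x => x) hperm hpair]
  exact (pvEnumMap flat (PySem.List.dedup flat)
    (fun s hs => (PySem.List.mem_dedup _ s).mp hs) 0).symm
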